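-- pv_equiv track=rewrite | github.com/c0urse1/BU_Superagent | src/infra/pdf/pdf_metadata.py | _build_page_to_section
-- ===== SOURCE A (Python) =====
-- def _build_page_to_section(toc: list[tuple[int, str, int]], page_count: int) -> dict[int, str]:
--     """
--     Convert TOC entries to a 'current section' label for each page.
--     - toc page indices are 1-based; internal mapping is 0-based.
--     """
--     # Sort TOC by page
--     toc_sorted = sorted(toc, key=lambda x: x[2])
--     page_to_sec: dict[int, str] = {}
--     cur_title: str = ""
--     cur_ptr = 0
--     for p in range(page_count):
--         # advance current section if next TOC entry starts at/before this page
--         while cur_ptr < len(toc_sorted) and (toc_sorted[cur_ptr][2] - 1) <= p: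
--             cur_title = toc_sorted[cur_ptr][1].strip()
--             cur_ptr += 1
--         page_to_sec[p] = cur_title
--     return page_to_sec
-- ===== SOURCE B (Python) =====
-- def _build_page_to_section(toc: list[tuple[int, str, int]], page_count: int) -> dict[int, str]:
--     """Stateless re-decomposition: strip titles once up front, then compute each
--     page's label independently as the last prepared entry starting at or before it."""
--     entries = [(page - 1, title.strip()) for _, title, page in sorted(toc, key=lambda x: x[2])]
--
--     def label(p: int) -> str:
--         t = ""
--         for start, s in entries:
--             if start <= p:
--                 t = s
--         return t
--
--     return {p: label(p) for p in range(page_count)}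
-- ===== Notes on version B (the rewrite author's own statement) =====
-- stated objective: simpler
-- what changed: Replaces the stateful while-loop pointer that advances across pages with a stateless per-page scan: each page's label is computed independently as the last sorted TOC entry starting at or before that page, so no (cur_title, cur_ptr) state is threaded through the page loop.
import Mathlib
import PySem

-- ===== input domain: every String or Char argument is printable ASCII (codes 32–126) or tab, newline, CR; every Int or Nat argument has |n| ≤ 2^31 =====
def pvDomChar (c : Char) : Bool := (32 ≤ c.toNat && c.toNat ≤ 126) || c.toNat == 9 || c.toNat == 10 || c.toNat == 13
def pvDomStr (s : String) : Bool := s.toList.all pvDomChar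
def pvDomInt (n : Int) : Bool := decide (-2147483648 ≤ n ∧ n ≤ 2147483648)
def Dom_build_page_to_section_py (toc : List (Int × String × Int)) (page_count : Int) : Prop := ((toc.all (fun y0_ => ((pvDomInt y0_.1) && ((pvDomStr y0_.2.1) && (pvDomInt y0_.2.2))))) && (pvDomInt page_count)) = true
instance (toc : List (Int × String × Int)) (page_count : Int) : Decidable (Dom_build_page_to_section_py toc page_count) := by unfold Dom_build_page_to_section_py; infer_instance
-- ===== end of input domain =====

-- B replaces the stateful pointer walk with an independent per-page scan (objective: simpler).

-- ===== PORT A =====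
-- the inner `while cur_ptr < len(toc_sorted) and (toc_sorted[cur_ptr][2] - 1) <= p:` loop
def pvAdvA (ts : List (Int × String × Int)) (p : Int) (title : String) (ptr : Nat) :
    String × Nat :=
  if h : ptr < ts.length then
    if (ts[ptr]'h).2.2 - 1 ≤ p then
      pvAdvA ts p (PySem.Str.strip (ts[ptr]'h).2.1) (ptr + 1)
    else (title, ptr)
  else (title, ptr)
termination_by ts.length - ptr

def build_page_to_section_py (toc : List (Int × String × Int)) (page_count : Int) :
    List (Int × String) :=
  let toc_sorted := PySem.List.sorted toc (fun x => x.2.2)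
  let st :=
    (PySem.List.pyRange 0 page_count 1).foldl
      (fun (st : PySem.Dict Int String × String × Nat) p =>
        let tp := pvAdvA toc_sorted p st.2.1 st.2.2
        (st.1.insert p tp.1, tp.1, tp.2))
      (PySem.Dict.empty, "", 0)
  st.1.items

-- ===== PORT B =====
-- def label(p): t = ""; for start, s in entries: if start <= p: t = s; return t
def pvLabel (es : List (Int × String)) (p : Int) : String :=
  es.foldl (fun t e => if e.1 ≤ p then e.2 else t) ""

def build_page_to_section_py_alt (toc : List (Int × String × Int)) (page_count : Int) :
    List (Int × String) :=
  let entries := (PySem.List.sorted toc (fun x => x.2.2)).map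
    (fun e => (e.2.2 - 1, PySem.Str.strip e.2.1))
  ((PySem.List.pyRange 0 page_count 1).foldl
      (fun (d : PySem.Dict Int String) p => d.insert p (pvLabel entries p))
      PySem.Dict.empty).items

-- ===== PRECONDITION & SPEC =====
def Spec_build_page_to_section_py (toc : List (Int × String × Int)) (page_count : Int) (out : List (Int × String)) : Prop := out = build_page_to_section_py_alt toc page_count
instance (toc : List (Int × String × Int)) (page_count : Int) (out : List (Int × String)) : Decidable (Spec_build_page_to_section_py toc page_count out) := by unfold Spec_build_page_to_section_py; infer_instance

-- ===== CLAIM (what is proved, stated in full; the proofs are below) =====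
def Claim_equal_build_page_to_section_py : Prop := ∀ (toc : List (Int × String × Int)) (page_count : Int), Dom_build_page_to_section_py toc page_count → Spec_build_page_to_section_py toc page_count (build_page_to_section_py toc page_count)

-- ===== LEMMAS AND PROOFS =====

-- proof-only helpers
def pvLabel0 (ts : List (Int × String × Int)) (p : Int) : String :=
  ts.foldl (fun t e => if e.2.2 - 1 ≤ p then PySem.Str.strip e.2.1 else t) ""

theorem pvLabel_map (ts : List (Int × String × Int)) (p : Int) :
    pvLabel (ts.map (fun e => (e.2.2 - 1, PySem.Str.strip e.2.1))) p = pvLabel0 ts p := by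
  simp [pvLabel, pvLabel0, List.foldl_map]

def pvF (p : Int) (e : Int × String × Int) : Bool := decide (e.2.2 - 1 ≤ p)

def pvG (n : Nat) (e : Int × String × Int) : Bool := decide (0 < n) && pvF ((n : Int) - 1) e

def pvStripFold (l : List (Int × String × Int)) (t : String) : String :=
  l.foldl (fun _ e => PySem.Str.strip e.2.1) t

def pvAdvRest (p : Int) : List (Int × String × Int) → String → Nat → String × Nat
  | [], t, q => (t, q)
  | e :: r, t, q =>
    if e.2.2 - 1 ≤ p then pvAdvRest p r (PySem.Str.strip e.2.1) (q + 1) else (t, q)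

theorem pvAdvA_eq_rest (ts : List (Int × String × Int)) (p : Int) :
    ∀ (fuel : Nat) (ptr : Nat) (t : String), ts.length - ptr ≤ fuel →
      pvAdvA ts p t ptr = pvAdvRest p (ts.drop ptr) t ptr := by
  intro fuel
  induction fuel with
  | zero =>
    intro ptr t h
    have hge : ts.length ≤ ptr := by omega
    rw [pvAdvA, List.drop_eq_nil_of_le hge]
    simp [pvAdvRest, Nat.not_lt.mpr hge]
  | succ k ih =>
    intro ptr t h
    rw [pvAdvA]
    by_cases hlt : ptr < ts.length
    · rw [List.drop_eq_getElem_cons hlt]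
      simp only [hlt, dif_pos]
      by_cases hc : (ts[ptr]'hlt).2.2 - 1 ≤ p
      · rw [if_pos hc, pvAdvRest, if_pos hc, ih (ptr + 1) _ (by omega)]
      · rw [if_neg hc, pvAdvRest, if_neg hc]
    · rw [List.drop_eq_nil_of_le (by omega)]
      simp [pvAdvRest, hlt]

theorem pvAdvRest_eq (p : Int) :
    ∀ (r : List (Int × String × Int)) (t : String) (q : Nat),
      pvAdvRest p r t q =
        (pvStripFold (r.takeWhile (pvF p)) t, q + (r.takeWhile (pvF p)).length) := by
  intro r
  induction r with
  | nil => intro t q; simp [pvAdvRest, pvStripFold]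
  | cons e rr ih =>
    intro t q
    rw [pvAdvRest]
    by_cases hc : e.2.2 - 1 ≤ p
    · rw [if_pos hc, ih, List.takeWhile_cons_of_pos (by simp [pvF, hc])]
      simp [pvStripFold]
      omega
    · rw [if_neg hc, List.takeWhile_cons_of_neg (by simp [pvF, hc])]
      simp [pvStripFold]

theorem pvDropWhile_fail (p : Int) :
    ∀ (r : List (Int × String × Int)), r.Pairwise (fun a b => a.2.2 ≤ b.2.2) →
      ∀ e ∈ r.dropWhile (pvF p), pvF p e = false := by
  intro r
  induction r with
  | nil => simp
  | cons a rr ih =>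
    intro hp e he
    have h1 : ∀ b ∈ rr, a.2.2 ≤ b.2.2 := (List.pairwise_cons.mp hp).1
    have h2 := (List.pairwise_cons.mp hp).2
    by_cases hc : pvF p a
    · rw [List.dropWhile_cons_of_pos hc] at he
      exact ih h2 e he
    · rw [List.dropWhile_cons_of_neg hc] at he
      rcases List.mem_cons.mp he with he | he
      · subst he; simpa using hc
      · have := h1 e he
        simp only [pvF, decide_eq_true_eq] at hc ⊢
        simp only [decide_eq_false_iff_not]
        omega

theorem pvTakeWhile_mono {α : Type} (g g' : α → Bool) (hm : ∀ e, g e = true → g' e = true) :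
    ∀ l : List α, l.takeWhile g' = l.takeWhile g ++ (l.dropWhile g).takeWhile g' := by
  intro l
  induction l with
  | nil => simp
  | cons a r ih =>
    by_cases hc : g a
    · rw [List.takeWhile_cons_of_pos hc, List.dropWhile_cons_of_pos hc,
        List.takeWhile_cons_of_pos (hm a hc), ih]
      simp
    · rw [List.takeWhile_cons_of_neg hc, List.dropWhile_cons_of_neg hc]
      simp

theorem pvG_succ (n : Nat) : pvG (n + 1) = pvF (n : Int) := by
  funext e
  simp only [pvG, pvF, Nat.succ_pos, decide_true, Bool.true_and, decide_eq_decide]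
  push_cast
  omega

theorem pvFoldl_all_true (p : Int) :
    ∀ (l : List (Int × String × Int)) (t : String), (∀ e ∈ l, pvF p e = true) →
      l.foldl (fun t e => if e.2.2 - 1 ≤ p then PySem.Str.strip e.2.1 else t) t
        = pvStripFold l t := by
  intro l
  induction l with
  | nil => intro t _; rfl
  | cons a r ih =>
    intro t h
    have ha : a.2.2 - 1 ≤ p := by
      have := h a (by simp); simpa [pvF] using this
    simp only [List.foldl_cons, if_pos ha, pvStripFold]
    exact ih _ (fun e he => h e (by simp [he]))

theorem pvFoldl_all_false (p : Int) :
    ∀ (l : List (Int × String × Int)) (t : String), (∀ e ∈ l, pvF p e = false) →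
      l.foldl (fun t e => if e.2.2 - 1 ≤ p then PySem.Str.strip e.2.1 else t) t = t := by
  intro l
  induction l with
  | nil => intro t _; rfl
  | cons a r ih =>
    intro t h
    have ha : ¬ (a.2.2 - 1 ≤ p) := by
      have := h a (by simp); simpa [pvF] using this
    simp only [List.foldl_cons, if_neg ha]
    exact ih _ (fun e he => h e (by simp [he]))

theorem pvLabel_eq (ts : List (Int × String × Int))
    (hs : ts.Pairwise (fun a b => a.2.2 ≤ b.2.2)) (p : Int) :
    pvLabel0 ts p = pvStripFold (ts.takeWhile (pvF p)) "" := by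
  unfold pvLabel0
  conv_lhs => rw [← List.takeWhile_append_dropWhile (p := pvF p) (l := ts)]
  rw [List.foldl_append,
    pvFoldl_all_true p _ _ (fun e he => List.mem_takeWhile_imp he),
    pvFoldl_all_false p _ _ (pvDropWhile_fail p ts hs)]

-- drop past the takeWhile prefix is dropWhile
theorem pvDrop_takeWhile {α : Type} (g : α → Bool) :
    ∀ l : List α, l.drop (l.takeWhile g).length = l.dropWhile g := by
  intro l
  induction l with
  | nil => rfl
  | cons a r ih =>
    by_cases hc : g a
    · rw [List.takeWhile_cons_of_pos hc, List.dropWhile_cons_of_pos hc,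
        List.length_cons, List.drop_succ_cons, ih]
    · rw [List.takeWhile_cons_of_neg hc, List.dropWhile_cons_of_neg hc,
        List.length_nil, List.drop_zero]

-- the main loop invariant: A's fold state after n pages
theorem pvMain (ts : List (Int × String × Int))
    (hs : ts.Pairwise (fun a b => a.2.2 ≤ b.2.2)) :
    ∀ n : Nat,
      (PySem.List.pyRange 0 n 1).foldl
          (fun (st : PySem.Dict Int String × String × Nat) p =>
            (st.1.insert p (pvAdvA ts p st.2.1 st.2.2).1,
             (pvAdvA ts p st.2.1 st.2.2).1, (pvAdvA ts p st.2.1 st.2.2).2))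
          (PySem.Dict.empty, "", 0)
        = ((PySem.List.pyRange 0 n 1).foldl
             (fun (d : PySem.Dict Int String) p => d.insert p (pvLabel0 ts p))
             PySem.Dict.empty,
           pvStripFold (ts.takeWhile (pvG n)) "",
           (ts.takeWhile (pvG n)).length) := by
  intro n
  induction n with
  | zero =>
    have h0 : ts.takeWhile (pvG 0) = [] := by
      cases ts with
      | nil => rfl
      | cons a r => rw [List.takeWhile_cons_of_neg (by simp [pvG])]
    rw [PySem.List.pyRange_one_eq_nil (by norm_num)]
    simp [h0, pvStripFold]
  | succ n ih =>
    have hsp : PySem.List.pyRange 0 ((n + 1 : Nat) : Int) 1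
        = PySem.List.pyRange 0 (n : Nat) 1 ++ [(n : Int)] := by
      have : ((n + 1 : Nat) : Int) = (n : Int) + 1 := by push_cast; ring
      rw [this, PySem.List.pyRange_one_succ_right (by positivity)]
    rw [hsp, List.foldl_append, List.foldl_append, ih]
    simp only [List.foldl_cons, List.foldl_nil]
    have hadv : pvAdvA ts (n : Int) (pvStripFold (ts.takeWhile (pvG n)) "")
        (ts.takeWhile (pvG n)).length
        = (pvStripFold (ts.takeWhile (pvG (n + 1))) "",
           (ts.takeWhile (pvG (n + 1))).length) := by
      rw [pvAdvA_eq_rest ts (n : Int) (ts.length) _ _ (by omega),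
        pvDrop_takeWhile, pvAdvRest_eq]
      have hmono : ∀ e, pvG n e = true → pvF (n : Int) e = true := by
        intro e he
        simp only [pvG, pvF, Bool.and_eq_true, decide_eq_true_eq] at he ⊢
        omega
      have hsplit : ts.takeWhile (pvF (n : Int))
          = ts.takeWhile (pvG n) ++ (ts.dropWhile (pvG n)).takeWhile (pvF (n : Int)) :=
        pvTakeWhile_mono (pvG n) (pvF (n : Int)) hmono ts
      rw [pvG_succ, hsplit]
      simp [pvStripFold, List.foldl_append]
    have hlab : pvLabel0 ts (n : Int) = pvStripFold (ts.takeWhile (pvG (n + 1))) "" := by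
      rw [pvLabel_eq ts hs, pvG_succ]
    simp only [hadv, hlab]

-- normalise a possibly-negative page_count
theorem pvRange_toNat (m : Int) :
    PySem.List.pyRange 0 m 1 = PySem.List.pyRange 0 ((m.toNat : Nat) : Int) 1 := by
  rw [PySem.List.pyRange_one, PySem.List.pyRange_one]
  have h : (m - 0).toNat = (((m.toNat : Nat) : Int) - 0).toNat := by omega
  rw [h]

-- ===== VERDICT (by name: the statement is the Claim_ definition above) =====
theorem build_page_to_section_py_spec : Claim_equal_build_page_to_section_py := by
  intro toc page_count _
  have hs : (PySem.List.sorted toc (fun x => x.2.2)).Pairwise (fun a b => a.2.2 ≤ b.2.2) :=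
    PySem.List.sorted_pairwise toc (fun x => x.2.2)
  unfold Spec_build_page_to_section_py
  simp only [build_page_to_section_py, build_page_to_section_py_alt, pvLabel_map]
  rw [pvRange_toNat page_count,
    pvMain (PySem.List.sorted toc (fun x => x.2.2)) hs page_count.toNat]
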